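-- pv_equiv track=rewrite | github.com/erickpeirson/MON | main.py | handle_result_taxon
-- ===== SOURCE A (Python) =====
-- def handle_result_taxon(result):
--     """
--     Parse the taxon ID porition of LINNAEUS NER result.
--
--     If multiple possible taxa are suggested, chooses the one with the greater
--     confidence level.
--
--     Parameters
--     ----------
--     result : list
--         A CSV-parsed row from the LINNAEUS NER results file.
--
--     Returns
--     -------
--     str
--         NCBI Taxonomy ID for NER-matched taxon.
--     """
--     taxa = [ r.split(':')[-1] for r in result[0].split('|') ]
--     if len(taxa) > 1:
--         confidence = []
--         ids = []
--         for t in taxa: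
--             t_c = t.split('?')
--             confidence.append(t_c[1])
--             ids.append(t_c[0])
--
--         return ids[confidence.index(max(confidence))]
--     else:
--         return taxa[0].split('?')[0]
-- ===== SOURCE B (Python) =====
-- def handle_result_taxon(result):
--     parts = result[0].split('|')
--     if len(parts) > 1:
--         # single fused pass: keep the best (id, key) pair seen so far; strict '>'
--         # keeps the first maximum, like confidence.index(max(confidence)).
--         best_id = None
--         best_key = None
--         for part in parts:
--             pieces = part.split(':')[-1].split('?')
--             tid, key = pieces[0], pieces[1]
--             if best_key is None or key > best_key:
--                 best_id, best_key = tid, key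
--         return best_id
--     else:
--         return parts[0].split(':')[-1].split('?')[0]
-- ===== Notes on version B (the rewrite author's own statement) =====
-- stated objective: alternative
-- what changed: Replaces A's taxa list plus parallel confidence/ids lists plus max-then-index scan with one fused pass over the split parts that maintains the best (id, key) pair with a strict '>' (first max wins).
import Mathlib
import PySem

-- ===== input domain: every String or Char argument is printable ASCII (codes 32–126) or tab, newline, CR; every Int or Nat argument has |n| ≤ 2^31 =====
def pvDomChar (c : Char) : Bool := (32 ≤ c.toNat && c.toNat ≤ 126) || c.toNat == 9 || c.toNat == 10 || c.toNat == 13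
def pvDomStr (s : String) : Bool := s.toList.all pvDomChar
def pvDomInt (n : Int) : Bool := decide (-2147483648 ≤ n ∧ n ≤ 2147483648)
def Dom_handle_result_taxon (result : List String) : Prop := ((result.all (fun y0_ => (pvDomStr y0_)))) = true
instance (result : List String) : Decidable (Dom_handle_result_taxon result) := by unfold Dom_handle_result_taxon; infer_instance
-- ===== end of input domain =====

-- B replaces A's taxa list, parallel confidence/ids lists and max-then-index scan by one fused pass
-- keeping the best (id, key) pair (alternative decomposition; same cost).

-- ===== PORT A =====
def handle_result_taxon (result : List String) : String :=
  -- taxa = [ r.split(':')[-1] for r in result[0].split('|') ]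
  let taxa := ((PySem.Str.split? (PySem.List.pyGetD result 0 "") "|").getD []).map
      (fun r => PySem.List.pyGetD ((PySem.Str.split? r ":").getD []) (-1) "")
  if 1 < taxa.length then
    -- the loop building the two parallel lists
    let ci := taxa.foldl (fun (acc : List String × List String) t =>
        let t_c := (PySem.Str.split? t "?").getD []
        (acc.1 ++ [PySem.List.pyGetD t_c 1 ""], acc.2 ++ [PySem.List.pyGetD t_c 0 ""])) ([], [])
    let confidence := ci.1
    let ids := ci.2
    -- ids[confidence.index(max(confidence))]
    PySem.List.pyGetD ids
      (((PySem.List.index? confidence ((PySem.List.max? confidence (fun c => c)).getD "")).getD 0 : Nat) : Int) ""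
  else
    PySem.List.pyGetD ((PySem.Str.split? (PySem.List.pyGetD taxa 0 "") "?").getD []) 0 ""

-- ===== PORT B =====
def handle_result_taxon_alt (result : List String) : String :=
  -- parts = result[0].split('|')
  let parts := (PySem.Str.split? (PySem.List.pyGetD result 0 "") "|").getD []
  if 1 < parts.length then
    -- for part in parts: keep best (id, key) pair; 'key > best_key' = first max wins
    let best := parts.foldl (fun (acc : Option String × Option String) part =>
        let pieces := (PySem.Str.split?
            (PySem.List.pyGetD ((PySem.Str.split? part ":").getD []) (-1) "") "?").getD []
        let tid := PySem.List.pyGetD pieces 0 ""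
        let key := PySem.List.pyGetD pieces 1 ""
        match acc.2 with
        | none => (some tid, some key)
        | some bk => if bk < key then (some tid, some key) else acc) (none, none)
    best.1.getD ""
  else
    -- parts[0].split(':')[-1].split('?')[0]
    PySem.List.pyGetD ((PySem.Str.split?
      (PySem.List.pyGetD ((PySem.Str.split? (PySem.List.pyGetD parts 0 "") ":").getD []) (-1) "")
      "?").getD []) 0 ""

-- ===== PRECONDITION & SPEC =====
-- Pre_ excludes exactly the inputs where Python A raises: an empty result (IndexError on result[0]) and,
-- when more than one taxon is parsed, a taxon without '?' (IndexError on t.split('?')[1]).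
def Pre_handle_result_taxon (result : List String) : Prop :=
  result ≠ [] ∧
  (let taxa := ((PySem.Str.split? (PySem.List.pyGetD result 0 "") "|").getD []).map
      (fun r => PySem.List.pyGetD ((PySem.Str.split? r ":").getD []) (-1) "")
   1 < taxa.length → ∀ t ∈ taxa, PySem.Str.isIn "?" t = true)
instance (result : List String) : Decidable (Pre_handle_result_taxon result) := by
  unfold Pre_handle_result_taxon; infer_instance

def pvWitness_handle_result_taxon : List String := ["species:9606?0.97|species:10090?0.42"]

def Spec_handle_result_taxon (result : List String) (out : String) : Prop := out = handle_result_taxon_alt result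
instance (result : List String) (out : String) : Decidable (Spec_handle_result_taxon result out) := by
  unfold Spec_handle_result_taxon; infer_instance

-- ===== CLAIM (what is proved, stated in full; the proofs are below) =====
def Claim_equal_handle_result_taxon : Prop := ∀ (result : List String), Dom_handle_result_taxon result → Pre_handle_result_taxon result → Spec_handle_result_taxon result (handle_result_taxon result)

-- ===== LEMMAS AND PROOFS =====

-- the taxon token of one '|'-part, its confidence key and its id
def pvTax (r : String) : String := PySem.List.pyGetD ((PySem.Str.split? r ":").getD []) (-1) ""
def pvKey (t : String) : String := PySem.List.pyGetD ((PySem.Str.split? t "?").getD []) 1 ""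
def pvId (t : String) : String := PySem.List.pyGetD ((PySem.Str.split? t "?").getD []) 0 ""
def pvStep (m t : String) : String := if pvKey m < pvKey t then t else m
-- B's loop body
def pvBStep (acc : Option String × Option String) (part : String) : Option String × Option String :=
  let pieces := (PySem.Str.split?
      (PySem.List.pyGetD ((PySem.Str.split? part ":").getD []) (-1) "") "?").getD []
  let tid := PySem.List.pyGetD pieces 0 ""
  let key := PySem.List.pyGetD pieces 1 ""
  match acc.2 with
  | none => (some tid, some key)
  | some bk => if bk < key then (some tid, some key) else acc

lemma pv_maxfold (ts : List String) (x : String) :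
    (ts.map pvKey).foldl max (pvKey x) = pvKey (ts.foldl pvStep x) := by
  induction ts generalizing x with
  | nil => rfl
  | cons t ts ih =>
      simp only [List.map_cons, List.foldl_cons]
      have hst : max (pvKey x) (pvKey t) = pvKey (pvStep x t) := by
        unfold pvStep
        rcases lt_trichotomy (pvKey x) (pvKey t) with h | h | h
        · rw [if_pos h, max_eq_right h.le]
        · rw [if_neg (by rw [h]; exact lt_irrefl _), h, max_self]
        · rw [if_neg (not_lt_of_gt h), max_eq_left h.le]
      rw [hst]; exact ih _

lemma pv_firstmax (ts : List String) (x : String) :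
    ∃ pre suf, x :: ts = pre ++ (ts.foldl pvStep x) :: suf ∧
      (∀ y ∈ pre, pvKey y < pvKey (ts.foldl pvStep x)) ∧
      (∀ y ∈ x :: ts, pvKey y ≤ pvKey (ts.foldl pvStep x)) := by
  induction ts generalizing x with
  | nil => exact ⟨[], [], rfl, by simp, by simp⟩
  | cons t ts ih =>
      simp only [List.foldl_cons]
      by_cases h : pvKey x < pvKey t
      · -- step picks t
        have hs : pvStep x t = t := if_pos h
        rw [hs]
        obtain ⟨pre, suf, hdec, hlt, hle⟩ := ih t
        have hxm : pvKey x < pvKey (ts.foldl pvStep t) :=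
          lt_of_lt_of_le h (hle t (by simp))
        refine ⟨x :: pre, suf, by simp [hdec], ?_, ?_⟩
        · intro y hy
          rcases List.mem_cons.mp hy with rfl | hy
          · exact hxm
          · exact hlt y hy
        · intro y hy
          rcases List.mem_cons.mp hy with rfl | hy
          · exact hxm.le
          · exact hle y hy
      · -- step keeps x
        have hs : pvStep x t = x := if_neg h
        rw [hs]
        have htx : pvKey t ≤ pvKey x := le_of_not_gt h
        obtain ⟨pre, suf, hdec, hlt, hle⟩ := ih x
        cases pre with
        | nil =>
            simp only [List.nil_append, List.cons.injEq] at hdec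
            obtain ⟨hx, _⟩ := hdec
            refine ⟨[], t :: ts, by rw [List.nil_append, ← hx], by simp, ?_⟩
            intro y hy
            rcases List.mem_cons.mp hy with rfl | hy
            · exact hle y (by simp)
            · rcases List.mem_cons.mp hy with rfl | hy
              · exact le_trans htx (hle x (by simp))
              · exact hle y (by simp [hy])
        | cons p pre' =>
            simp only [List.cons_append, List.cons.injEq] at hdec
            obtain ⟨rfl, hts⟩ := hdec
            have hxlt : pvKey x < pvKey (ts.foldl pvStep x) := hlt x (by simp)
            refine ⟨x :: t :: pre', suf, by (conv_lhs => rw [hts]); rfl, ?_, ?_⟩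
            · intro y hy
              rcases List.mem_cons.mp hy with rfl | hy
              · exact hxlt
              · rcases List.mem_cons.mp hy with rfl | hy
                · exact lt_of_le_of_lt htx hxlt
                · exact hlt y (by simp [hy])
            · intro y hy
              rcases List.mem_cons.mp hy with rfl | hy
              · exact hle y (by simp)
              · rcases List.mem_cons.mp hy with rfl | hy
                · exact (lt_of_le_of_lt htx hxlt).le
                · exact hle y (by simp [hy])

-- A's loop builds exactly (taxa.map pvKey, taxa.map pvId)
lemma pv_foldpair (ts : List String) (acc : List String × List String) :
    ts.foldl (fun (acc : List String × List String) t =>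
        let t_c := (PySem.Str.split? t "?").getD []
        (acc.1 ++ [PySem.List.pyGetD t_c 1 ""], acc.2 ++ [PySem.List.pyGetD t_c 0 ""])) acc
      = (acc.1 ++ ts.map pvKey, acc.2 ++ ts.map pvId) := by
  induction ts generalizing acc with
  | nil => simp
  | cons t ts ih => simp [ih, pvKey, pvId]

-- selecting ids[confidence.index(max(confidence))] from the decomposition
lemma pv_select (pre suf : List String) (m : String)
    (hlt : ∀ y ∈ pre, pvKey y < pvKey m) :
    PySem.List.pyGetD ((pre ++ m :: suf).map pvId)
      (((PySem.List.index? ((pre ++ m :: suf).map pvKey) (pvKey m)).getD 0 : Nat) : Int) "" = pvId m := by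
  have hidx : PySem.List.index? ((pre ++ m :: suf).map pvKey) (pvKey m) = some pre.length := by
    rw [PySem.List.index?_eq_some_iff]
    refine ⟨pre.map pvKey, suf.map pvKey, by simp, by simp, ?_⟩
    intro hmem
    obtain ⟨y, hy, hey⟩ := List.mem_map.mp hmem
    exact absurd hey (ne_of_lt (hlt y hy))
  rw [hidx, Option.getD_some, PySem.List.pyGetD_natCast]
  simp [List.getD]

-- B's fused pass tracks exactly (pvId m, pvKey m) where m is A's running pvStep fold over the taxa
lemma pv_bfold (ps : List String) (m : String) :
    ps.foldl pvBStep (some (pvId m), some (pvKey m))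
      = (some (pvId ((ps.map pvTax).foldl pvStep m)), some (pvKey ((ps.map pvTax).foldl pvStep m))) := by
  induction ps generalizing m with
  | nil => rfl
  | cons p ps ih =>
      simp only [List.foldl_cons, List.map_cons]
      have hstep : pvBStep (some (pvId m), some (pvKey m)) p
          = (some (pvId (pvStep m (pvTax p))), some (pvKey (pvStep m (pvTax p)))) := by
        show (if pvKey m < pvKey (pvTax p)
              then (some (pvId (pvTax p)), some (pvKey (pvTax p)))
              else (some (pvId m), some (pvKey m)))
            = _
        unfold pvStep
        by_cases h : pvKey m < pvKey (pvTax p)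
        · rw [if_pos h, if_pos h]
        · rw [if_neg h, if_neg h]
      rw [hstep]; exact ih _

-- ===== VERDICT =====
theorem handle_result_taxon_spec : Claim_equal_handle_result_taxon := by
  intro result _ _
  unfold Spec_handle_result_taxon handle_result_taxon handle_result_taxon_alt
  simp only [List.length_map]
  set parts := (PySem.Str.split? (PySem.List.pyGetD result 0 "") "|").getD [] with hparts
  by_cases h : 1 < parts.length
  · rw [if_pos h, if_pos h]
    match parts, h with
    | p :: ps, _ =>
      rw [pv_foldpair]
      simp only [List.nil_append]
      -- B side: first iteration seeds the pair, then pv_bfold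
      have hB : (p :: ps).foldl pvBStep (none, none)
          = (some (pvId ((ps.map pvTax).foldl pvStep (pvTax p))),
             some (pvKey ((ps.map pvTax).foldl pvStep (pvTax p)))) := by
        rw [List.foldl_cons]
        have h0 : pvBStep (none, none) p = (some (pvId (pvTax p)), some (pvKey (pvTax p))) := rfl
        rw [h0, pv_bfold]
      show PySem.List.pyGetD (((p :: ps).map pvTax).map pvId)
          (((PySem.List.index? (((p :: ps).map pvTax).map pvKey)
            ((PySem.List.max? (((p :: ps).map pvTax).map pvKey) (fun c => c)).getD "")).getD 0 : Nat) : Int) ""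
          = (((p :: ps).foldl pvBStep (none, none)).1).getD ""
      rw [hB]
      simp only [List.map_cons, Option.getD_some]
      set x := pvTax p
      set ts := ps.map pvTax
      obtain ⟨pre, suf, hdec, hlt, _⟩ := pv_firstmax ts x
      have hconf : PySem.List.max? (pvKey x :: ts.map pvKey) (fun c => c) =
          some (pvKey (ts.foldl pvStep x)) := by
        rw [PySem.List.max?_id_cons, pv_maxfold]
      rw [hconf, Option.getD_some,
        show pvId x :: List.map pvId ts = (x :: ts).map pvId from rfl,
        show pvKey x :: List.map pvKey ts = (x :: ts).map pvKey from rfl, hdec]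
      exact pv_select pre suf _ hlt
  · rw [if_neg h, if_neg h]
    -- taxa[0] = pvTax parts[0] whether parts is empty or not
    cases parts with
    | nil => rfl
    | cons p ps =>
        simp only [List.map_cons, PySem.List.pyGetD_zero_cons]
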